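-- pv_equiv track=rewrite | github.com/jaredkoontz/leetcode_py | 2611_mice_and_cheese/test_mice_and_cheese.py | miceAndCheese_heap
-- ===== SOURCE A (Python) =====
-- import heapq
--
-- def miceAndCheese_heap(reward1: list[int], reward2: list[int], k: int) -> int:
--     output = 0
--     n = len(reward1)
--     heap = []
--     for i in range(n):
--         heap.append((reward2[i] - reward1[i], i))
--
--     heapq.heapify(heap)
--     visited = set()
--     while k:
--         k -= 1
--         _, idx = heapq.heappop(heap)
--         visited.add(idx)
--         output += reward1[idx]
--
--     # If there is anything left that has not been taken, we take it from reward2.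
--     for idx, val in enumerate(reward2):
--         if idx in visited:
--             continue
--         output += val
--
--     return output
-- ===== SOURCE B (Python) =====
-- def miceAndCheese_heap(reward1: list[int], reward2: list[int], k: int) -> int:
--     # give every cheese to mouse 2, then upgrade the k best switches to mouse 1
--     gains = sorted((reward1[i] - reward2[i] for i in range(len(reward1))), reverse=True)
--     return sum(reward2) + sum(gains[j] for j in range(k))
-- ===== Notes on version B (the rewrite author's own statement) =====
-- stated objective: simpler
-- what changed: Replaces the heap of (reward2[i]-reward1[i], i) pairs, the k-pop loop with a visited set and the second pass over reward2 by a two-liner: sum(reward2) plus the k largest values of reward1[i]-reward2[i] from one descending sort.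
import Mathlib
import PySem

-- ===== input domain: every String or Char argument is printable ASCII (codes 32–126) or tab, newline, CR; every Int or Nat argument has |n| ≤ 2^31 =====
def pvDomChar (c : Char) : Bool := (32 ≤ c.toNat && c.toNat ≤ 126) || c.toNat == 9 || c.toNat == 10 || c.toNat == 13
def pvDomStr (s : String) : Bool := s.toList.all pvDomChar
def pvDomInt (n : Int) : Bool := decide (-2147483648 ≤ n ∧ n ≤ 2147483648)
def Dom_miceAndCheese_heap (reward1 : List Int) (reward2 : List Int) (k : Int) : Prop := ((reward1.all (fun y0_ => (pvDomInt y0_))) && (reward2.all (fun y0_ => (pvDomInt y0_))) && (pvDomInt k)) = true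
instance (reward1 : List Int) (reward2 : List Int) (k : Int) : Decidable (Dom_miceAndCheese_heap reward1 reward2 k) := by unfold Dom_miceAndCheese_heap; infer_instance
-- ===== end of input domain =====

-- B replaces A's heap + k-pop loop + second pass by sum(reward2) plus the k largest
-- values of reward1[i]-reward2[i] from one descending sort (objective: simpler).


-- ===== PORT A =====
-- Python tuple comparison '<' on the (diff, index) pairs heapq compares (lexicographic).
def pyPairLt (a b : Int × Int) : Bool := a.1 < b.1 || (a.1 == b.1 && a.2 < b.2)

-- heapq._siftdown(heap, startpos, pos) — the while loop (newitem = heap[pos] read at entry).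
def siftdownGo (startpos : Nat) (newitem : Int × Int) (heap : List (Int × Int)) (pos : Nat) :
    List (Int × Int) :=
  if _h : startpos < pos then
    let parentpos := (pos - 1) / 2
    let parent := heap.getD parentpos (0, 0)
    if pyPairLt newitem parent then
      siftdownGo startpos newitem (heap.set pos parent) parentpos
    else heap.set pos newitem
  else heap.set pos newitem
termination_by pos
decreasing_by omega

-- heapq._siftup(heap, pos): walk down to a leaf moving the smaller child up, then _siftdown.
def siftupGo (endpos startpos : Nat) (newitem : Int × Int) (heap : List (Int × Int)) (pos : Nat) :
    List (Int × Int) :=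
  let childpos := 2 * pos + 1
  if _h : childpos < endpos then
    let rightpos := childpos + 1
    let childpos :=
      if rightpos < endpos &&
          !(pyPairLt (heap.getD childpos (0, 0)) (heap.getD rightpos (0, 0))) then rightpos
      else childpos
    siftupGo endpos startpos newitem (heap.set pos (heap.getD childpos (0, 0))) childpos
  else
    siftdownGo startpos newitem (heap.set pos newitem) pos
termination_by endpos - pos
decreasing_by split <;> omega

def siftup (heap : List (Int × Int)) (pos : Nat) : List (Int × Int) :=
  siftupGo heap.length pos (heap.getD pos (0, 0)) heap pos

-- heapq.heapify(x): for i in reversed(range(len(x)//2)): _siftup(x, i)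
def pyHeapify (x : List (Int × Int)) : List (Int × Int) :=
  (List.range (x.length / 2)).reverse.foldl (fun h i => siftup h i) x

-- heapq.heappop(heap); none exactly where Python raises IndexError (empty heap).
def pyHeappop (heap : List (Int × Int)) : Option ((Int × Int) × List (Int × Int)) :=
  match heap.getLast? with
  | none => none
  | some lastelt =>
    let heap := heap.dropLast
    if heap.isEmpty then some (lastelt, heap)
    else some (heap.getD 0 (0, 0), siftup (heap.set 0 lastelt) 0)

-- the 'while k:' loop: k pops, accumulating output and the visited set (fuel = k, exact for k ≥ 0;
-- the 'none' branch is Python's IndexError, excluded by Pre_).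
def popLoop (reward1 : List Int) : Nat → List (Int × Int) → PySem.Set Int → Int →
    Int × PySem.Set Int
  | 0, _, visited, output => (output, visited)
  | m + 1, heap, visited, output =>
    match pyHeappop heap with
    | none => (output, visited)
    | some ((_, idx), heap') =>
        popLoop reward1 m heap' (PySem.Set.add visited idx)
          (output + PySem.List.pyGetD reward1 idx 0)

def miceAndCheese_heap (reward1 : List Int) (reward2 : List Int) (k : Int) : Int :=
  let n : Int := reward1.length
  -- for i in range(n): heap.append((reward2[i] - reward1[i], i))   (indices in range under Pre_)
  let heap := (PySem.List.pyRange 0 n 1).foldl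
    (fun h i => h ++ [(PySem.List.pyGetD reward2 i 0 - PySem.List.pyGetD reward1 i 0, i)]) []
  let heap := pyHeapify heap
  let res := popLoop reward1 k.toNat heap PySem.Set.empty 0
  -- for idx, val in enumerate(reward2): if idx in visited: continue; output += val
  (PySem.List.enumerate reward2 0).foldl
    (fun output iv => if PySem.Set.contains res.2 iv.1 then output else output + iv.2) res.1

-- ===== PORT B =====
def miceAndCheese_heap_alt (reward1 : List Int) (reward2 : List Int) (k : Int) : Int :=
  let gains := PySem.List.sorted ((PySem.List.pyRange 0 (reward1.length : Int) 1).map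
      (fun i => PySem.List.pyGetD reward1 i 0 - PySem.List.pyGetD reward2 i 0)) (fun x => x) true
  reward2.sum + ((PySem.List.pyRange 0 k 1).map (fun j => PySem.List.pyGetD gains j 0)).sum

-- ===== PRECONDITION & SPEC =====
-- Exactly where A returns: k < 0 or k > len(reward1) makes the pop loop exhaust the heap
-- (IndexError), and len(reward2) < len(reward1) makes reward2[i] raise while building the heap.
def Pre_miceAndCheese_heap (reward1 : List Int) (reward2 : List Int) (k : Int) : Prop :=
  0 ≤ k ∧ k ≤ reward1.length ∧ reward1.length ≤ reward2.length

instance (reward1 : List Int) (reward2 : List Int) (k : Int) :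
    Decidable (Pre_miceAndCheese_heap reward1 reward2 k) := by
  unfold Pre_miceAndCheese_heap; infer_instance

def pvWitness_miceAndCheese_heap : List Int × List Int × Int := ([3, 1, 4], [2, 4, 4], 2)

def Spec_miceAndCheese_heap (reward1 : List Int) (reward2 : List Int) (k : Int) (out : Int) : Prop := out = miceAndCheese_heap_alt reward1 reward2 k
instance (reward1 : List Int) (reward2 : List Int) (k : Int) (out : Int) : Decidable (Spec_miceAndCheese_heap reward1 reward2 k out) := by unfold Spec_miceAndCheese_heap; infer_instance

-- ===== CLAIM (what is proved, stated in full; the proofs are below) =====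
def Claim_equal_miceAndCheese_heap : Prop := ∀ (reward1 : List Int) (reward2 : List Int) (k : Int), Dom_miceAndCheese_heap reward1 reward2 k → Pre_miceAndCheese_heap reward1 reward2 k → Spec_miceAndCheese_heap reward1 reward2 k (miceAndCheese_heap reward1 reward2 k)


-- ===== LEMMAS AND PROOFS =====

-- ---- the strict order heapq compares with, and its order facts ----
def hget (h : List (Int × Int)) (i : Nat) : Int × Int := h.getD i (0, 0)

def ple (a b : Int × Int) : Prop := pyPairLt b a = false

lemma plt_iff (a b : Int × Int) :
    pyPairLt a b = true ↔ (a.1 < b.1 ∨ (a.1 = b.1 ∧ a.2 < b.2)) := by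
  simp [pyPairLt]

lemma ple_iff (a b : Int × Int) : ple a b ↔ (a.1 < b.1 ∨ (a.1 = b.1 ∧ a.2 ≤ b.2)) := by
  rw [ple, ← Bool.not_eq_true, plt_iff]; omega

lemma ple_refl (a : Int × Int) : ple a a := by rw [ple_iff]; omega

lemma ple_trans {a b c : Int × Int} (h1 : ple a b) (h2 : ple b c) : ple a c := by
  rw [ple_iff] at *; omega

lemma ple_of_plt {a b : Int × Int} (h : pyPairLt a b = true) : ple a b := by
  rw [plt_iff] at h; rw [ple_iff]; omega

lemma ple_of_not_plt {a b : Int × Int} (h : pyPairLt a b = false) : ple b a := h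

lemma ple_neg_fst {a b : Int × Int} (h : ple a b) : -b.1 ≤ -a.1 := by
  rw [ple_iff] at h; omega

-- ---- the subtree relation on array-encoded binary-tree indices ----
def TSub (r : Nat) (j : Nat) : Bool :=
  if j = r then true else if r < j then TSub r ((j - 1) / 2) else false
termination_by j
decreasing_by omega

def ChildOf (j c : Nat) : Prop := c = 2 * j + 1 ∨ c = 2 * j + 2

lemma inTree_self (r : Nat) : TSub r r = true := by rw [TSub]; simp

lemma inTree_le {r j : Nat} (h : TSub r j = true) : r ≤ j := by
  rw [TSub] at h
  split at h
  · omega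
  · split at h
    · omega
    · simp at h

lemma inTree_parent {r j : Nat} (hlt : r < j) (h : TSub r j = true) : TSub r ((j - 1) / 2) = true := by
  rw [TSub] at h; simp only [if_neg (by omega : ¬ j = r), if_pos hlt] at h; exact h

lemma inTree_child {r j c : Nat} (h : TSub r j = true) (hc : ChildOf j c) : TSub r c = true := by
  have hrj := inTree_le h
  have hcj : (c - 1) / 2 = j := by rcases hc with hc | hc <;> omega
  rw [TSub]; simp only [if_neg (by rcases hc with hc | hc <;> omega : ¬ c = r),
    if_pos (by rcases hc with hc | hc <;> omega : r < c), hcj, h]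

lemma inTree_of_child_sub {r j c : Nat} (hc : ChildOf j c) (hsc : TSub r c = true) (hne : c ≠ r) :
    TSub r j = true := by
  have hcj : (c - 1) / 2 = j := by rcases hc with hc | hc <;> omega
  rw [TSub] at hsc
  simp only [if_neg hne] at hsc
  split at hsc
  · rwa [hcj] at hsc
  · exact absurd hsc (by simp)

lemma inTree_zero (j : Nat) : TSub 0 j = true := by
  induction j using Nat.strong_induction_on with
  | _ j ih =>
    rw [TSub]; split
    · rfl
    · rw [if_pos (by omega)]; exact ih _ (by omega)

-- ---- getD/set bookkeeping ----
lemma ne_of_tsub {r j pos : Nat} (hj : TSub r j = false) (hsub : TSub r pos = true) :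
    pos ≠ j := by
  intro e; rw [← e, hsub] at hj; exact Bool.noConfusion hj

lemma hget_set_self {h : List (Int × Int)} {i : Nat} (hi : i < h.length) (v : Int × Int) :
    hget (h.set i v) i = v := by
  simp [hget, List.getD, hi]

lemma hget_set_ne {h : List (Int × Int)} {i j : Nat} (hne : i ≠ j) (v : Int × Int) :
    hget (h.set i v) j = hget h j := by
  simp [hget, List.getD, List.getElem?_set_ne hne]

lemma set_hget_self {h : List (Int × Int)} {i : Nat} (hi : i < h.length) :
    h.set i (hget h i) = h := by
  rw [hget, List.getD_eq_getElem _ _ hi]; exact List.set_getElem_self ..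

lemma set_hole_perm {h : List (Int × Int)} {p q : Nat} (hp : p < h.length) (hq : q < h.length)
    (hne : p ≠ q) (x : Int × Int) : ((h.set p (hget h q)).set q x).Perm (h.set p x) := by
  induction h generalizing p q with
  | nil => simp at hp
  | cons a t ih =>
    cases p with
    | zero =>
      cases q with
      | zero => exact absurd rfl hne
      | succ m =>
        have hmt : m < t.length := by simpa using hq
        have hg : hget (a :: t) (m + 1) = hget t m := by simp [hget, List.getD]
        rw [hg]
        have e1 := List.set_perm_cons_eraseIdx hmt x
        have e2 := List.set_perm_cons_eraseIdx hmt (hget t m)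
        show List.Perm ((hget t m) :: t.set m x) (x :: t)
        refine ((e1.cons _).trans (List.Perm.swap _ _ _)).trans ?_
        refine ((e2.symm).cons x).trans ?_
        rw [set_hget_self hmt]
    | succ n =>
      cases q with
      | zero =>
        have hnt : n < t.length := by simpa using hp
        have hg : hget (a :: t) 0 = a := by simp [hget, List.getD]
        rw [hg]
        have e1 := List.set_perm_cons_eraseIdx hnt a
        have e2 := List.set_perm_cons_eraseIdx hnt x
        show List.Perm (x :: t.set n a) (a :: t.set n x)
        exact ((e1.cons x).trans (List.Perm.swap _ _ _)).trans ((e2.symm).cons a)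
      | succ m =>
        have hg : hget (a :: t) (m + 1) = hget t m := by simp [hget, List.getD]
        rw [hg]
        show List.Perm (a :: (t.set n (hget t m)).set m x) (a :: t.set n x)
        exact (ih (by simpa using hp) (by simpa using hq) (by omega)).cons a

-- ---- core heap invariant ----
def IsHeap (h : List (Int × Int)) : Prop :=
  ∀ j c, ChildOf j c → c < h.length → ple (hget h j) (hget h c)

lemma hget_eq_getElem {h : List (Int × Int)} {j : Nat} (hj : j < h.length) :
    hget h j = h[j] := List.getD_eq_getElem h (0,0) hj

lemma heap_root_min {h : List (Int × Int)} (hh : IsHeap h) :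
    ∀ j, j < h.length → ple (hget h 0) (hget h j) := by
  intro j
  induction j using Nat.strong_induction_on with
  | _ j ih =>
    intro hj
    rcases Nat.eq_zero_or_pos j with rfl | hpos
    · exact ple_refl _
    · have hpar : ChildOf ((j - 1) / 2) j := by unfold ChildOf; omega
      exact ple_trans (ih ((j - 1) / 2) (by omega) (by omega)) (hh _ _ hpar hj)

-- ---- correctness of the two sift phases ----
theorem siftdownGo_spec (r : Nat) (newitem : Int × Int) :
    ∀ (pos : Nat) (h : List (Int × Int)),
    TSub r pos = true → pos < h.length →
    (∀ j c, TSub r j = true → ChildOf j c → c < h.length →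
        ¬(r < pos ∧ j = (pos - 1) / 2 ∧ c = pos) →
        ple (hget (h.set pos newitem) j) (hget (h.set pos newitem) c)) →
    (r < pos → ∀ c, ChildOf pos c → c < h.length → ple (hget h ((pos - 1) / 2)) (hget h c)) →
    (siftdownGo r newitem h pos).length = h.length ∧
    (siftdownGo r newitem h pos).Perm (h.set pos newitem) ∧
    (∀ j, TSub r j = false → hget (siftdownGo r newitem h pos) j = hget h j) ∧
    (∀ j c, TSub r j = true → ChildOf j c → c < h.length →
        ple (hget (siftdownGo r newitem h pos) j) (hget (siftdownGo r newitem h pos) c)) := by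
  intro pos
  induction pos using Nat.strong_induction_on with
  | _ pos ih =>
    intro h hsub hpos hE hBr
    rw [siftdownGo]
    by_cases hrp : r < pos
    · rw [dif_pos hrp]
      have hp1 : 1 ≤ pos := by omega
      set p := (pos - 1) / 2 with hpdef
      have hppos : p < pos := by omega
      have hplen : p < h.length := by omega
      have hpne : p ≠ pos := by omega
      by_cases hlt : pyPairLt newitem (h.getD p (0, 0)) = true
      · rw [if_pos hlt]
        have hsubp : TSub r p = true := inTree_parent hrp hsub
        have hlen1 : (h.set pos (h.getD p (0, 0))).length = h.length := by
          rw [List.length_set]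
        -- values in g1 := (h.set pos parent).set p newitem
        have hg1 : ∀ j, j ≠ p → j ≠ pos →
            hget ((h.set pos (h.getD p (0, 0))).set p newitem) j = hget h j := by
          intro j h1 h2
          rw [hget_set_ne (fun e => h1 e.symm), hget_set_ne (fun e => h2 e.symm)]
        have hg1p : hget ((h.set pos (h.getD p (0, 0))).set p newitem) p = newitem :=
          hget_set_self (by rw [List.length_set]; omega) _
        have hg1pos : hget ((h.set pos (h.getD p (0, 0))).set p newitem) pos =
            h.getD p (0, 0) := by
          rw [hget_set_ne hpne, hget_set_self hpos]
        -- plain-h edges we can pull out of hE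
        have hEh : ∀ j c, TSub r j = true → ChildOf j c → c < h.length → j ≠ pos → c ≠ pos →
            ple (hget h j) (hget h c) := by
          intro j c hs hc hcl hj hcne
          have := hE j c hs hc hcl (by tauto)
          rwa [hget_set_ne (fun e => hj e.symm), hget_set_ne (fun e => hcne e.symm)] at this
        have hchildp : ChildOf p pos := by unfold ChildOf; omega
        obtain ⟨ihl, ihperm, ihout, ihedge⟩ := ih p hppos (h.set pos (h.getD p (0, 0)))
          hsubp (by omega)
          (by -- E1
            intro j c hjs hc hcl hexc
            rw [hlen1] at hcl
            have hcj : j < c := by rcases hc with hc | hc <;> omega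
            by_cases hjp : j = p
            · by_cases hcpos : c = pos
              · rw [hjp, hcpos, hg1p, hg1pos]; exact ple_of_plt hlt
              · rw [hjp, hg1p, hg1 c (by omega) hcpos]
                refine ple_trans (ple_of_plt hlt) ?_
                have := hEh p c (by rwa [hjp] at hjs) (by rwa [hjp] at hc) hcl hpne hcpos
                exact this
            · by_cases hjpos : j = pos
              · have hcne : c ≠ pos := by omega
                rw [hjpos, hg1pos, hg1 c (by omega) hcne]
                exact hBr hrp c (by rwa [hjpos] at hc) hcl
              · by_cases hcp : c = p
                · by_cases hrpp : r < p
                  · exact absurd ⟨hrpp, by rcases hc with hc | hc <;> omega, hcp⟩ hexc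
                  · have := inTree_le hjs
                    omega
                · have hcpos : c ≠ pos := by
                    intro e; apply hjp; rcases hc with hc | hc <;> omega
                  rw [hg1 j hjp hjpos, hg1 c hcp hcpos]
                  exact hEh j c hjs hc hcl hjpos hcpos)
          (by -- Br1
            intro hrpp c hc hcl
            rw [hlen1] at hcl
            have hq : (p - 1) / 2 < p := by omega
            have hqpos : (p - 1) / 2 ≠ pos := by omega
            have hsubq : TSub r ((p - 1) / 2) = true := inTree_parent hrpp hsubp
            have hchildq : ChildOf ((p - 1) / 2) p := by unfold ChildOf; omega
            have hqp : ple (hget h ((p - 1) / 2)) (hget h p) :=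
              hEh _ p hsubq hchildq hplen hqpos hpne
            rw [hget_set_ne (fun e => hqpos e.symm)]
            by_cases hcpos : c = pos
            · subst hcpos
              rw [hget_set_self hpos]
              exact hqp
            · rw [hget_set_ne (fun e => hcpos e.symm)]
              have hcp : c ≠ p := by rcases hc with hc | hc <;> omega
              exact ple_trans hqp (hEh p c hsubp hc hcl hpne hcpos))
        refine ⟨by rw [ihl, hlen1], ?_, ?_, ?_⟩
        · exact ihperm.trans (set_hole_perm hpos hplen (Ne.symm hpne) newitem)
        · intro j hj
          rw [ihout j hj, hget_set_ne (ne_of_tsub hj hsub) _]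
        · intro j c hjs hc hcl
          exact ihedge j c hjs hc (by rw [hlen1]; exact hcl)
      · rw [if_neg hlt]
        refine ⟨List.length_set .., List.Perm.refl _, ?_, ?_⟩
        · intro j hj
          exact hget_set_ne (ne_of_tsub hj hsub) _
        · intro j c hjs hc hcl
          by_cases hexc : j = p ∧ c = pos
          · obtain ⟨rfl, rfl⟩ := hexc
            rw [hget_set_ne (fun e => hpne e.symm), hget_set_self hpos]
            exact ple_of_not_plt (by rwa [Bool.not_eq_true] at hlt)
          · exact hE j c hjs hc hcl (by tauto)
    · rw [dif_neg hrp]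
      have hpr : pos = r := le_antisymm (by omega) (inTree_le hsub)
      refine ⟨List.length_set .., List.Perm.refl _, ?_, ?_⟩
      · intro j hj
        exact hget_set_ne (ne_of_tsub hj hsub) _
      · intro j c hjs hc hcl
        exact hE j c hjs hc hcl (by omega)

theorem siftupGo_spec (r : Nat) (newitem : Int × Int) :
    ∀ (pos : Nat) (h : List (Int × Int)),
    TSub r pos = true → pos < h.length →
    (∀ j c, TSub r j = true → j ≠ pos → ChildOf j c → c < h.length →
        ple (hget h j) (hget h c)) →
    (r < pos → ∀ c, ChildOf pos c → c < h.length → ple (hget h ((pos - 1) / 2)) (hget h c)) →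
    (siftupGo h.length r newitem h pos).length = h.length ∧
    (siftupGo h.length r newitem h pos).Perm (h.set pos newitem) ∧
    (∀ j, TSub r j = false → hget (siftupGo h.length r newitem h pos) j = hget h j) ∧
    (∀ j c, TSub r j = true → ChildOf j c → c < h.length →
        ple (hget (siftupGo h.length r newitem h pos) j) (hget (siftupGo h.length r newitem h pos) c)) := by
  suffices H : ∀ (n : Nat) (pos : Nat) (h : List (Int × Int)), h.length - pos = n →
      TSub r pos = true → pos < h.length →
      (∀ j c, TSub r j = true → j ≠ pos → ChildOf j c → c < h.length →
          ple (hget h j) (hget h c)) →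
      (r < pos → ∀ c, ChildOf pos c → c < h.length → ple (hget h ((pos - 1) / 2)) (hget h c)) →
      (siftupGo h.length r newitem h pos).length = h.length ∧
      (siftupGo h.length r newitem h pos).Perm (h.set pos newitem) ∧
      (∀ j, TSub r j = false → hget (siftupGo h.length r newitem h pos) j = hget h j) ∧
      (∀ j c, TSub r j = true → ChildOf j c → c < h.length →
          ple (hget (siftupGo h.length r newitem h pos) j)
            (hget (siftupGo h.length r newitem h pos) c)) by
    intro pos h hsub hpos hE hBr
    exact H (h.length - pos) pos h rfl hsub hpos hE hBr
  intro n
  induction n using Nat.strong_induction_on with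
  | _ n ih =>
    intro pos h hn hsub hpos hE hBr
    rw [siftupGo]
    by_cases hcl : 2 * pos + 1 < h.length
    · rw [dif_pos hcl]
      dsimp only
      -- the chosen child c*
      set csel := if (2 * pos + 1 + 1 < h.length &&
          !pyPairLt (h.getD (2 * pos + 1) (0, 0)) (h.getD (2 * pos + 1 + 1) (0, 0))) = true
        then 2 * pos + 1 + 1 else 2 * pos + 1 with hcsel
      have hchild : ChildOf pos csel := by
        rw [hcsel]; unfold ChildOf; split <;> omega
      have hclen : csel < h.length := by
        rw [hcsel]; split
        · next hb => exact (Bool.and_eq_true_iff.mp hb).1 |> of_decide_eq_true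
        · exact hcl
      have hcpos : pos < csel := by rw [hcsel]; split <;> omega
      have hmin : ∀ c, ChildOf pos c → c < h.length → ple (hget h csel) (hget h c) := by
        intro c hc hcll
        rcases hc with hc | hc
        · -- c is the left child
          rw [hcsel]; split
          · next hb =>
            have h2 : pyPairLt (h.getD (2 * pos + 1) (0, 0)) (h.getD (2 * pos + 1 + 1) (0, 0)) = false := by
              simpa using (Bool.and_eq_true_iff.mp hb).2
            subst hc
            exact ple_of_not_plt h2
          · next _ => subst hc; exact ple_refl _
        · -- c is the right child
          rw [hcsel]; split
          · next _ => subst hc; exact ple_refl _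
          · next hb =>
            subst hc
            have hplt : pyPairLt (h.getD (2 * pos + 1) (0, 0))
                (h.getD (2 * pos + 1 + 1) (0, 0)) = true := by
              by_contra hne
              rw [Bool.not_eq_true] at hne
              exact hb (by rw [hne]; simp; omega)
            exact ple_of_plt hplt
      -- the recursive array
      have hlen1 : (h.set pos (h.getD csel (0, 0))).length = h.length := List.length_set ..
      have hcselpos : csel ≠ pos := by omega
      have hg1 : ∀ j, j ≠ pos → hget (h.set pos (h.getD csel (0, 0))) j = hget h j := by
        intro j hj
        exact hget_set_ne (fun e => hj e.symm) _
      have hg1pos : hget (h.set pos (h.getD csel (0, 0))) pos = hget h csel := by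
        rw [hget_set_self hpos]; rfl
      obtain ⟨ihl, ihperm, ihout, ihedge⟩ := ih (h.length - csel) (by omega) csel
        (h.set pos (h.getD csel (0, 0))) (by rw [hlen1]) (inTree_child hsub hchild)
        (by rw [hlen1]; exact hclen)
        (by -- E1
          intro j c hjs hjne hc hcl'
          rw [hlen1] at hcl'
          by_cases hjpos : j = pos
          · have hcc : c = 2 * pos + 1 ∨ c = 2 * pos + 2 := by
              rw [hjpos] at hc; exact hc
            have hcof : ChildOf pos c := hcc
            have hcne : c ≠ pos := by rcases hcc with hcc | hcc <;> omega
            rw [hjpos, hg1pos, hg1 c hcne]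
            exact hmin c hcof hcl'
          · by_cases hcpos : c = pos
            · have hj' : j = (pos - 1) / 2 := by rw [hcpos] at hc; rcases hc with hc | hc <;> omega
              have hpos1 : 1 ≤ pos := by rw [hcpos] at hc; rcases hc with hc | hc <;> omega
              rw [hcpos, hg1 j hjpos, hg1pos]
              by_cases hrp : r < pos
              · rw [hj']
                exact hBr hrp csel hchild hclen
              · have h1 := inTree_le hjs
                have h2 := inTree_le hsub
                omega
            · rw [hg1 j hjpos, hg1 c hcpos]
              exact hE j c hjs hjpos hc hcl'
        )
        (by -- Br1
          intro hrc c hc hcl'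
          rw [hlen1] at hcl'
          have hpar : (csel - 1) / 2 = pos := by
            rcases hchild with hc' | hc' <;> omega
          have hcne : c ≠ pos := by rcases hc with hc' | hc' <;> omega
          rw [hpar, hg1pos, hg1 c hcne]
          exact hE csel c (inTree_child hsub hchild) hcselpos hc hcl')
      rw [hlen1] at ihl ihperm ihout ihedge
      refine ⟨ihl, ?_, ?_, fun j c hjs hc hcl' => ihedge j c hjs hc hcl'⟩
      · exact ihperm.trans (set_hole_perm hpos hclen (by omega) newitem)
      · intro j hj
        rw [ihout j hj, hg1 j (Ne.symm (ne_of_tsub hj hsub))]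
    · rw [dif_neg hcl]
      have hss : (h.set pos newitem).set pos newitem = h.set pos newitem := List.set_set ..
      obtain ⟨dl, dperm, dout, dedge⟩ := siftdownGo_spec r newitem pos (h.set pos newitem)
        hsub (by rw [List.length_set]; exact hpos)
        (by
          intro j c hjs hc hcl' hexc
          rw [List.length_set] at hcl'
          rw [hss]
          by_cases hjpos : j = pos
          · exact absurd hcl' (by rw [hjpos] at hc; rcases hc with hc | hc <;> omega)
          · have hcne : c ≠ pos := by
              intro e
              have hj' : j = (pos - 1) / 2 := by rw [e] at hc; rcases hc with hc | hc <;> omega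
              by_cases hrp : r < pos
              · exact hexc ⟨hrp, hj', e⟩
              · have h1 := inTree_le hjs
                have h2 := inTree_le hsub
                have : 1 ≤ pos := by rw [e] at hc; rcases hc with hc | hc <;> omega
                omega
            rw [hget_set_ne (fun e => hjpos e.symm), hget_set_ne (fun e => hcne e.symm)]
            exact hE j c hjs hjpos hc hcl')
        (by
          intro _ c hc hcl'
          rw [List.length_set] at hcl'
          exact absurd hcl' (by rcases hc with hc | hc <;> omega))
      rw [hss] at dperm
      rw [List.length_set] at dl dedge
      refine ⟨dl, dperm, ?_, fun j c hjs hc hcl' => dedge j c hjs hc hcl'⟩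
      intro j hj
      rw [dout j hj, hget_set_ne (ne_of_tsub hj hsub) _]

theorem siftup_spec (h : List (Int × Int)) (pos : Nat) (hpos : pos < h.length)
    (hpre : ∀ j c, TSub pos j = true → j ≠ pos → ChildOf j c → c < h.length →
        ple (hget h j) (hget h c)) :
    (siftup h pos).length = h.length ∧ (siftup h pos).Perm h ∧
    (∀ j, TSub pos j = false → hget (siftup h pos) j = hget h j) ∧
    (∀ j c, TSub pos j = true → ChildOf j c → c < h.length →
        ple (hget (siftup h pos) j) (hget (siftup h pos) c)) := by
  have := siftupGo_spec pos (hget h pos) pos h (inTree_self pos) hpos hpre (by omega)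
  unfold siftup
  rwa [set_hget_self hpos] at this

-- ---- heapify ----
theorem heapify_fold :
    ∀ (m : Nat) (h : List (Int × Int)), m ≤ h.length →
    (∀ j c, m ≤ j → ChildOf j c → c < h.length → ple (hget h j) (hget h c)) →
    ((List.range m).reverse.foldl (fun h i => siftup h i) h).length = h.length ∧
    ((List.range m).reverse.foldl (fun h i => siftup h i) h).Perm h ∧
    IsHeap ((List.range m).reverse.foldl (fun h i => siftup h i) h) := by
  intro m
  induction m with
  | zero =>
    intro h _ hpre
    exact ⟨rfl, List.Perm.refl _, fun j c hc hcl => hpre j c (Nat.zero_le _) hc hcl⟩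
  | succ m ih =>
    intro h hm hpre
    rw [List.range_succ, List.reverse_append, List.reverse_singleton]
    show (((List.range m).reverse.foldl (fun h i => siftup h i) (siftup h m))).length = _ ∧ _
    have hmlen : m < h.length := by omega
    obtain ⟨hl1, hp1, hout1, hheap1⟩ := siftup_spec h m hmlen (by
      intro j c hs hne hc hcl
      exact hpre j c (by have := inTree_le hs; omega) hc hcl)
    have hpre1 : ∀ j c, m ≤ j → ChildOf j c → c < (siftup h m).length →
        ple (hget (siftup h m) j) (hget (siftup h m) c) := by
      intro j c hj hc hcl
      rw [hl1] at hcl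
      by_cases hs : TSub m j = true
      · exact hheap1 j c hs hc hcl
      · have hjm : m + 1 ≤ j := by
          rcases Nat.eq_or_lt_of_le hj with heq | h'
          · exfalso; apply hs; rw [← heq]; exact inTree_self m
          · omega
        have hcs : TSub m c = false := by
          by_contra hcs
          rw [Bool.not_eq_false] at hcs
          by_cases hcm : c = m
          · rcases hc with hc | hc <;> omega
          · exact hs (inTree_of_child_sub hc hcs hcm)
        rw [hout1 j (by simpa using hs), hout1 c hcs]
        exact hpre j c hjm hc hcl
    obtain ⟨hl2, hp2, hheap2⟩ := ih (siftup h m) (by omega) hpre1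
    exact ⟨by rw [hl2, hl1], hp2.trans hp1, hheap2⟩

theorem heapify_spec (x : List (Int × Int)) :
    (pyHeapify x).length = x.length ∧ (pyHeapify x).Perm x ∧ IsHeap (pyHeapify x) := by
  apply heapify_fold (x.length / 2) x (by omega)
  intro j c hj hc hcl
  exact absurd hcl (by rcases hc with hc | hc <;> omega)

-- ---- heappop ----
theorem heappop_spec (h : List (Int × Int)) (hne : h ≠ []) (hh : IsHeap h) :
    ∃ h', pyHeappop h = some (hget h 0, h') ∧ IsHeap h' ∧ (hget h 0 :: h').Perm h ∧
      h'.length + 1 = h.length := by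
  match h, hne with
  | [x], _ =>
    refine ⟨[], rfl, ?_, List.Perm.refl _, rfl⟩
    intro j c _ hcl
    simp at hcl
  | x :: y :: t, _ =>
    set h := x :: y :: t with hxy
    have hlen : h.length = t.length + 2 := by simp [hxy]
    have hne' : h ≠ [] := by simp [hxy]
    have hgl : h.getLast? = some (h.getLast hne') := List.getLast?_eq_some_getLast ..
    obtain ⟨d', hd⟩ : ∃ d', h.dropLast = x :: d' := ⟨(y :: t).dropLast, by simp [hxy]⟩
    have hdlen : h.dropLast.length = t.length + 1 := by simp [hxy]
    have hemp : h.dropLast.isEmpty = false := by rw [hd]; rfl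
    set lastelt := h.getLast hne' with hle
    set g := h.dropLast.set 0 lastelt with hg
    have hglen : g.length = t.length + 1 := by rw [hg, List.length_set, hdlen]
    have hpop : pyHeappop h = some (hget h.dropLast 0, siftup g 0) := by
      rw [pyHeappop, hgl]
      simp only [hemp, Bool.false_eq_true, if_false]
      rfl
    have hget_d : ∀ j, j < h.dropLast.length → hget h.dropLast j = hget h j := by
      intro j hj
      have hj' : j < h.length := by rw [hdlen] at hj; omega
      rw [hget_eq_getElem hj, hget_eq_getElem hj', List.getElem_dropLast]
    have hget_g : ∀ j, j ≠ 0 → j < g.length → hget g j = hget h j := by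
      intro j hj hjl
      rw [hg, hget_set_ne (by omega), hget_d j (by rw [hdlen]; rw [hglen] at hjl; omega)]
    obtain ⟨hl1, hp1, _, hheap1⟩ := siftup_spec g 0 (by rw [hglen]; omega) (by
      intro j c hs hjne hc hcl
      have hc0 : c ≠ 0 := by rcases hc with hc | hc <;> omega
      have hjc : j < c := by rcases hc with hc | hc <;> omega
      rw [hget_g j hjne (by omega), hget_g c hc0 hcl]
      exact hh j c hc (by rw [hglen] at hcl; omega))
    have hx0 : hget h.dropLast 0 = x := by rw [hd]; rfl
    have hh0 : hget h 0 = x := by rw [hxy]; rfl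
    refine ⟨siftup g 0, by rw [hpop, hx0, hh0], ?_, ?_, by rw [hl1, hglen, hlen]⟩
    · intro j c hc hcl
      exact hheap1 j c (inTree_zero j) hc (by rwa [hl1] at hcl)
    · have hsplit : h.dropLast ++ [lastelt] = h := List.dropLast_append_getLast hne'
      rw [hd] at hsplit
      have htail : d' ++ [lastelt] = y :: t := by
        have := hsplit
        rw [hxy] at this
        exact (List.cons_inj_right x).mp (by simpa using this)
      have hgd : g = lastelt :: d' := by rw [hg, hd]; rfl
      rw [hh0]
      refine ((hp1.trans (by rw [hgd])).cons x).trans ?_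
      show List.Perm (x :: lastelt :: d') h
      rw [hxy, ← htail]
      exact (List.perm_append_singleton lastelt d').symm.cons x

lemma root_min_mem {h : List (Int × Int)} (hh : IsHeap h) {y : Int × Int} (hy : y ∈ h) :
    ple (hget h 0) y := by
  obtain ⟨j, hj, rfl⟩ := List.mem_iff_getElem.mp hy
  rw [← hget_eq_getElem hj]
  exact heap_root_min hh j hj

-- ---- the pop sequence ----
def popSeq : Nat → List (Int × Int) → List (Int × Int)
  | 0, _ => []
  | m + 1, h =>
    match pyHeappop h with
    | none => []
    | some (it, h') => it :: popSeq m h'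

lemma popLoop_eq (r1 : List Int) :
    ∀ (m : Nat) (h : List (Int × Int)) (vis : PySem.Set Int) (out : Int),
    popLoop r1 m h vis out =
      (out + ((popSeq m h).map (fun p => PySem.List.pyGetD r1 p.2 0)).sum,
       (popSeq m h).foldl (fun v p => PySem.Set.add v p.2) vis) := by
  intro m
  induction m with
  | zero => intro h vis out; simp [popLoop, popSeq]
  | succ m ih =>
    intro h vis out
    rw [popLoop, popSeq]
    match hp : pyHeappop h with
    | none => simp
    | some (it, h') =>
      obtain ⟨d, idx⟩ := it
      simp [ih, add_assoc]

lemma popSeq_take : ∀ (m M : Nat) (h : List (Int × Int)), m ≤ M →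
    popSeq m h = (popSeq M h).take m := by
  intro m
  induction m with
  | zero => simp [popSeq]
  | succ m ih =>
    intro M h hm
    match M, hm with
    | M + 1, hm =>
      rw [popSeq, popSeq]
      match pyHeappop h with
      | none => simp
      | some (it, h') => simp [ih M h' (by omega)]

theorem popSeq_spec : ∀ (m : Nat) (h : List (Int × Int)), IsHeap h → m ≤ h.length →
    ∃ rest, ((popSeq m h) ++ rest).Perm h ∧ (popSeq m h).length = m ∧
      (popSeq m h).Pairwise ple ∧ (∀ x ∈ popSeq m h, ∀ y ∈ rest, ple x y) := by
  intro m
  induction m with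
  | zero =>
    intro h _ _
    exact ⟨h, by simp [popSeq], by simp [popSeq], by simp [popSeq], by simp [popSeq]⟩
  | succ m ih =>
    intro h hh hm
    have hne : h ≠ [] := by
      intro hemp; rw [hemp] at hm; simp at hm
    obtain ⟨h', hp, hh', hperm, hlen⟩ := heappop_spec h hne hh
    have hps : popSeq (m + 1) h = hget h 0 :: popSeq m h' := by rw [popSeq, hp]
    obtain ⟨rest, hr1, hr2, hr3, hr4⟩ := ih h' hh' (by omega)
    have hmem_h' : ∀ y ∈ h', ple (hget h 0) y := by
      intro y hy
      exact root_min_mem hh (hperm.mem_iff.mp (List.mem_cons_of_mem _ hy))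
    have hsub : ∀ y, y ∈ popSeq m h' ++ rest → y ∈ h' := fun y hy => hr1.mem_iff.mp hy
    refine ⟨rest, ?_, by simp [hps, hr2], ?_, ?_⟩
    · rw [hps]
      show List.Perm (hget h 0 :: (popSeq m h' ++ rest)) h
      exact (hr1.cons _).trans hperm
    · rw [hps]
      refine List.Pairwise.cons ?_ hr3
      intro y hy
      exact hmem_h' y (hsub y (List.mem_append_left _ hy))
    · rw [hps]
      intro a ha y hy
      rcases List.mem_cons.mp ha with rfl | ha'
      · exact hmem_h' y (hsub y (List.mem_append_right _ hy))
      · exact hr4 a ha' y hy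

-- ---- assembly: from the heap machinery to the two ports ----
def pairsOf (r1 r2 : List Int) : List (Int × Int) :=
  (List.range r1.length).map (fun i => (r2.getD i 0 - r1.getD i 0, (i : Int)))

lemma heapInit_eq (r1 r2 : List Int) :
    (PySem.List.pyRange 0 (r1.length : Int) 1).foldl
      (fun h i => h ++ [(PySem.List.pyGetD r2 i 0 - PySem.List.pyGetD r1 i 0, i)]) [] =
      pairsOf r1 r2 := by
  rw [PySem.List.foldl_append_singleton_eq_map, PySem.List.pyRange_one, List.map_map]
  simp only [Int.sub_zero, Int.toNat_natCast, pairsOf]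
  apply List.map_congr_left
  intro i _
  simp [PySem.List.pyGetD_natCast]

lemma diffs_eq (r1 r2 : List Int) :
    (PySem.List.pyRange 0 (r1.length : Int) 1).map
      (fun i => PySem.List.pyGetD r1 i 0 - PySem.List.pyGetD r2 i 0) =
      (List.range r1.length).map (fun i => r1.getD i 0 - r2.getD i 0) := by
  rw [PySem.List.pyRange_one, List.map_map]
  simp only [Int.sub_zero, Int.toNat_natCast]
  apply List.map_congr_left
  intro i _
  simp [PySem.List.pyGetD_natCast]

lemma map_pyGetD_pyRange_take (xs : List Int) (k : Int) (hk : 0 ≤ k)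
    (hlen : k.toNat ≤ xs.length) :
    (PySem.List.pyRange 0 k 1).map (fun j => PySem.List.pyGetD xs j 0) = xs.take k.toNat := by
  rw [PySem.List.pyRange_one, List.map_map]
  simp only [Int.sub_zero]
  apply List.ext_getElem
  · simp; omega
  · intro i h1 h2
    simp only [List.length_map, List.length_range] at h1
    rw [List.getElem_map, List.getElem_range, List.getElem_take]
    simp only [Function.comp_apply, zero_add]
    rw [PySem.List.pyGetD_natCast, List.getD_eq_getElem _ _ (by omega)]

lemma pairs_neg_fst (r1 r2 : List Int) :
    (pairsOf r1 r2).map (fun p => -p.1) =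
      (List.range r1.length).map (fun i => r1.getD i 0 - r2.getD i 0) := by
  rw [pairsOf, List.map_map]
  apply List.map_congr_left
  intro i _
  simp

lemma pairs_snd_nodup (r1 r2 : List Int) : ((pairsOf r1 r2).map (·.2)).Nodup := by
  rw [pairsOf, List.map_map]
  have : ((fun (p : Int × Int) => p.2) ∘ fun i : Nat => (r2.getD i 0 - r1.getD i 0, (i : Int))) =
      fun i : Nat => (i : Int) := rfl
  rw [this]
  exact (List.nodup_range).map (fun a b => by omega)

lemma mem_pairs {r1 r2 : List Int} {p : Int × Int} (hp : p ∈ pairsOf r1 r2) :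
    ∃ i : Nat, i < r1.length ∧ p = (r2.getD i 0 - r1.getD i 0, (i : Int)) := by
  obtain ⟨i, hi, rfl⟩ := List.mem_map.mp hp
  exact ⟨i, List.mem_range.mp hi, rfl⟩

-- ===== VERDICT (by name: the statement is the Claim_ definition above) =====
theorem miceAndCheese_heap_spec : Claim_equal_miceAndCheese_heap := by
  unfold Claim_equal_miceAndCheese_heap
  intro r1 r2 k _ hpre
  obtain ⟨hk0, hkn, hnm⟩ := hpre
  unfold Spec_miceAndCheese_heap miceAndCheese_heap miceAndCheese_heap_alt
  dsimp only
  rw [heapInit_eq]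
  set P := pairsOf r1 r2 with hP
  set n := r1.length with hn
  have hPlen : P.length = n := by rw [hP, pairsOf, hn]; simp
  obtain ⟨hl, hperm, hheap⟩ := heapify_spec P
  set H := pyHeapify P with hH
  have hHlen : H.length = n := by rw [hl, hPlen]
  have hknn : k.toNat ≤ n := by omega
  rw [popLoop_eq]
  set s := popSeq k.toNat H with hs
  set snds := s.map (·.2) with hsnds
  -- the full pop sequence is the sorted permutation of P
  obtain ⟨rest, hfp, hflen, hfsort, _⟩ := popSeq_spec H.length H hheap le_rfl
  set full := popSeq H.length H with hfull
  have hrest : rest = [] := by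
    have := hfp.length_eq
    rw [List.length_append, hflen] at this
    exact List.eq_nil_of_length_eq_zero (by omega)
  rw [hrest, List.append_nil] at hfp
  have hfullP : full.Perm P := hfp.trans hperm
  have hs_take : s = full.take k.toNat := by
    rw [hs, hfull]
    exact popSeq_take k.toNat H.length H (by omega)
  have hmem_s : ∀ p ∈ s, p ∈ P := by
    intro p hp
    exact hfullP.mem_iff.mp ((List.take_sublist _ _).mem (hs_take ▸ hp))
  -- B's sorted list of differences
  have hdiffs : (PySem.List.pyRange 0 (n : Int) 1).map
        (fun i => PySem.List.pyGetD r1 i 0 - PySem.List.pyGetD r2 i 0) =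
      (List.range n).map (fun i => r1.getD i 0 - r2.getD i 0) := diffs_eq r1 r2
  set S := PySem.List.sorted ((PySem.List.pyRange 0 (n : Int) 1).map
      (fun i => PySem.List.pyGetD r1 i 0 - PySem.List.pyGetD r2 i 0)) (fun x => x) true with hS
  have hSsorted : S.Pairwise (fun a b : Int => b ≤ a) := by
    have := PySem.List.sorted_pairwise_rev (xs := (PySem.List.pyRange 0 (n : Int) 1).map
      (fun i => PySem.List.pyGetD r1 i 0 - PySem.List.pyGetD r2 i 0)) (key := fun x : Int => x)
    exact this
  have hddsorted : (full.map (fun p => -p.1)).Pairwise (fun a b : Int => b ≤ a) :=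
    List.Pairwise.map _ (fun a b hab => ple_neg_fst hab) hfsort
  have hddperm : (full.map (fun p => -p.1)).Perm S := by
    refine (hfullP.map _).trans ?_
    rw [pairs_neg_fst, ← hn, ← hdiffs]
    exact (PySem.List.sorted_perm _ _ _).symm
  have hdd : full.map (fun p => -p.1) = S :=
    hddperm.eq_of_pairwise (fun a b _ _ h1 h2 => le_antisymm h2 h1) hddsorted hSsorted
  -- the visited set is exactly the set of popped indices
  have hvis : ∀ j : Int,
      PySem.Set.contains (s.foldl (fun v p => PySem.Set.add v p.2) PySem.Set.empty) j = true ↔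
        j ∈ snds := by
    intro j
    have : s.foldl (fun v p => PySem.Set.add v p.2) PySem.Set.empty =
        PySem.Set.ofList snds := by
      rw [hsnds, PySem.Set.ofList_eq_foldl, List.foldl_map]
      rfl
    rw [this, PySem.Set.contains_iff, PySem.Set.mem_ofList]
  -- rewrite the final loop into a filtered sum
  rw [show (fun (output : Int) (iv : Int × Int) =>
        if PySem.Set.contains (s.foldl (fun v p => PySem.Set.add v p.2) PySem.Set.empty) iv.1
        then output else output + iv.2) =
      (fun (output : Int) (iv : Int × Int) =>
        if (!PySem.Set.contains (s.foldl (fun v p => PySem.Set.add v p.2) PySem.Set.empty) iv.1)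
            = true
        then output + iv.2 else output) from by
    funext output iv
    cases PySem.Set.contains (s.foldl (fun v p => PySem.Set.add v p.2) PySem.Set.empty) iv.1 <;>
      simp]
  rw [PySem.List.foldl_if_eq_foldl_filter, PySem.List.foldl_add]
  -- split sum of reward2 along the visited indices
  have henum : PySem.List.enumerate r2 0 =
      (PySem.List.pyRange 0 (r2.length : Int) 1).map (fun j => (j, PySem.List.pyGetD r2 j 0)) := by
    have := PySem.List.enumerate_eq_map_pyRange r2 (0 : Int)
    rwa [PySem.List.len_eq] at this
  set V := List.foldl (fun v p => PySem.Set.add v p.2) PySem.Set.empty s with hV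
  dsimp only
  have hSlen : k.toNat ≤ S.length := by
    rw [hS, PySem.List.length_sorted, List.length_map, PySem.List.length_pyRange_one]
    omega
  rw [map_pyGetD_pyRange_take S k hk0 hSlen]
  have htake : s.map (fun p => -p.1) = S.take k.toNat := by
    rw [hs_take, ← hdd, List.map_take]
  have hsum_s : (s.map (fun p => PySem.List.pyGetD r1 p.2 0)).sum =
      (s.map (fun p => PySem.List.pyGetD r2 p.2 0)).sum + (s.map (fun p => -p.1)).sum := by
    have heq : s.map (fun p => PySem.List.pyGetD r1 p.2 0) =
        s.map (fun p => PySem.List.pyGetD r2 p.2 0 + -p.1) := by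
      apply List.map_congr_left
      intro p hp
      obtain ⟨i, hi, rfl⟩ := mem_pairs (hmem_s p hp)
      simp [PySem.List.pyGetD_natCast]
    rw [heq, PySem.List.sum_map_add_int]
  have hsnds_nodup : snds.Nodup := by
    have h1 : (full.map (·.2)).Nodup := (hfullP.map (·.2)).nodup_iff.mpr (pairs_snd_nodup r1 r2)
    rw [hsnds, hs_take, List.map_take]
    exact h1.sublist (List.take_sublist _ _)
  have hsnds_mem : ∀ j ∈ snds, 0 ≤ j ∧ j < (r2.length : Int) := by
    intro j hj
    obtain ⟨p, hp, rfl⟩ := List.mem_map.mp hj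
    obtain ⟨i, hi, rfl⟩ := mem_pairs (hmem_s p hp)
    constructor
    · exact Int.natCast_nonneg i
    · show (i : Int) < (r2.length : Int)
      exact_mod_cast (by omega : i < r2.length)
  have hfilter_perm : ((PySem.List.pyRange 0 (r2.length : Int) 1).filter
      (fun j => V.contains j)).Perm snds := by
    apply (List.perm_ext_iff_of_nodup ((PySem.List.nodup_pyRange_one _ _).filter _)
      hsnds_nodup).mpr
    intro a
    rw [List.mem_filter, PySem.List.mem_pyRange_one, hvis]
    constructor
    · exact fun h => h.2
    · intro h
      exact ⟨hsnds_mem a h, h⟩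
  have hfilter_eq : ((List.filter (fun iv => V.contains iv.1)
      (PySem.List.enumerate r2)).map Prod.snd).sum =
      (s.map (fun p => PySem.List.pyGetD r2 p.2 0)).sum := by
    rw [henum, List.filter_map, List.map_map]
    have hc : ((fun (iv : Int × Int) => V.contains iv.1) ∘
        (fun j : Int => (j, PySem.List.pyGetD r2 j 0))) = fun j => V.contains j := rfl
    rw [hc]
    have hrhs : s.map (fun p => PySem.List.pyGetD r2 p.2 0) =
        snds.map (fun j => PySem.List.pyGetD r2 j 0) := by
      rw [hsnds, List.map_map]; rfl
    rw [hrhs]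
    exact List.Perm.sum_eq (hfilter_perm.map _)
  have hsplit : ((List.filter (fun iv => !V.contains iv.1)
        (PySem.List.enumerate r2)).map Prod.snd).sum +
      ((List.filter (fun iv => V.contains iv.1) (PySem.List.enumerate r2)).map Prod.snd).sum =
      r2.sum := by
    have hp := List.filter_append_perm (fun iv : Int × Int => V.contains iv.1)
      (PySem.List.enumerate r2)
    have := List.Perm.sum_eq (hp.map Prod.snd)
    rw [List.map_append, List.sum_append] at this
    rw [show (List.map (fun (x : Int × Int) => x.2) (PySem.List.enumerate r2)) = r2 from
      PySem.List.map_snd_enumerate r2 0] at this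
    omega
  rw [← htake]
  omega
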